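-- pv_equiv track=rewrite | github.com/thguss/coding-test-study | Week4/youngmu/kakao1-youngmu.py | solution
-- ===== SOURCE A (Python) =====
-- def solution(id_list, report, k):
--     answer = [0 for _ in range(len(id_list))]
--     reported_dict = dict()
--
--     id_map = dict()
--     for idx in range(len(id_list)):
--         id_map[id_list[idx]] = idx
--
--     for report_log in report:
--         reporter, reported = report_log.split(" ")
--         if reported not in reported_dict:
--             reported_dict[reported] = set()
--         reported_dict[reported].add(reporter)
--
--     for reported in reported_dict:
--         if len(reported_dict[reported]) >= k:
--             for reporter in reported_dict[reported]:
--                 idx = id_map[reporter]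
--                 answer[idx] += 1
--
--     return answer
-- ===== SOURCE B (Python) =====
-- def solution(id_list, report, k):
--     count = {}
--     mapping = {}
--     for log in dict.fromkeys(report):  # dedupe, keeping first occurrences
--         reporter, reported = log.split(" ")
--         count[reported] = count.get(reported, 0) + 1
--         mapping.setdefault(reporter, []).append(reported)
--     return [sum(1 for d in mapping.get(uid, []) if count.get(d, 0) >= k)
--             for uid in id_list]
-- ===== Notes on version B (the rewrite author's own statement) =====
-- stated objective: idiomatic
-- what changed: B dedupes the report list once with dict.fromkeys, builds a reported->count map and the inverse reporter->reported-ids map in a single pass, and gathers each answer entry by iterating id_list, instead of A's reported->set-of-reporters grouping followed by scatter increments into an index-addressed array through an id->index map.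
-- outside the precondition, e.g. on solution(['a', 'a'], ['a a'], 1): A returns [0, 1], B returns [1, 1]
import Mathlib
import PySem

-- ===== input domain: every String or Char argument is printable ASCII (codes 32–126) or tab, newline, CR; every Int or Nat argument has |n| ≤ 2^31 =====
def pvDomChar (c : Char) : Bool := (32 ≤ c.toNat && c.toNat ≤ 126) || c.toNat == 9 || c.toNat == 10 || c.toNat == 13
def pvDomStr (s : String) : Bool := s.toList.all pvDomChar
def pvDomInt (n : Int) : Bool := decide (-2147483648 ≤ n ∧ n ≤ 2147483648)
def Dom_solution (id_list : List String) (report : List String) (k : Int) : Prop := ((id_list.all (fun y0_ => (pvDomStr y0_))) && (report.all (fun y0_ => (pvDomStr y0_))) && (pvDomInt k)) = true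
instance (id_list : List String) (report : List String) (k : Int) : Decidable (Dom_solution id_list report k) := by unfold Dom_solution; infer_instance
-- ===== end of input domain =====

-- B rebuilds the answer by a gather over id_list from an inverse reporter->reported map (one deduped pass),
-- instead of A's reported->set-of-reporters grouping with scatter increments through an id->index map (idiomatic alternative, same cost).


-- ===== PORT A =====
-- 'answer[idx] += 1'; exact here because every idx that reaches it is a value of id_map,
-- i.e. a valid non-negative list index (Pre_ excludes the KeyError path)
def pvIncAt (ans : List Int) (i : Int) : List Int := ans.set i.toNat (ans.getD i.toNat 0 + 1)

def solution (id_list : List String) (report : List String) (k : Int) : List Int :=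
  let answer : List Int := (PySem.List.pyRange 0 (id_list.length : Int) 1).map (fun _ => 0)
  let id_map : PySem.Dict String Int :=
    (PySem.List.pyRange 0 (id_list.length : Int) 1).foldl
      (fun d idx => d.insert (PySem.List.pyGetD id_list idx "") idx) PySem.Dict.empty
  let reported_dict : PySem.Dict String (PySem.Set String) :=
    report.foldl
      (fun d log =>
        match PySem.Str.split? log " " with
        | some [reporter, reported] =>
            -- 'if reported not in d: d[reported] = set(); d[reported].add(reporter)'
            -- is exactly d[reported] = (d.get(reported, set())).add(reporter) = Dict.modify
            PySem.Dict.modify d reported PySem.Set.empty (fun s => PySem.Set.add s reporter)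
        | _ => d)   -- unpacking raises ValueError: outside Pre_
      PySem.Dict.empty
  -- 'for reported in reported_dict' iterates the keys in insertion order (Dict.items);
  -- the inner 'for reporter in <set>' is a set iteration, but the scatter of +1s it performs
  -- is order-independent, so insertion order is exact for the result.
  reported_dict.items.foldl
    (fun ans p =>
      if k ≤ PySem.Set.len p.2 then
        p.2.foldl (fun ans reporter => pvIncAt ans (PySem.Dict.getD id_map reporter 0)) ans
      else ans)
    answer

-- ===== PORT B =====
-- 'reporter, reported = log.split(" ")' for B: the two parts, or none where unpacking would raise ValueError
def pvUnpack2 (parts : Option (List String)) : Option (String × String) :=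
  match parts with
  | none => none
  | some [] => none
  | some [_] => none
  | some (a :: b :: rest) => if rest.isEmpty then some (a, b) else none

def solution_alt (id_list : List String) (report : List String) (k : Int) : List Int :=
  let cm : PySem.Dict String Int × PySem.Dict String (List String) :=
    (PySem.List.dedup report).foldl
      (fun cm log =>
        match pvUnpack2 (PySem.Str.split? log " ") with
        | some (reporter, reported) =>
            (PySem.Dict.insert cm.1 reported (PySem.Dict.getD cm.1 reported 0 + 1),
             PySem.Dict.modify cm.2 reporter [] (fun l => l ++ [reported]))
        | none => cm)  -- unpacking raises ValueError: outside Pre_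
      (PySem.Dict.empty, PySem.Dict.empty)
  id_list.map (fun uid =>
    (PySem.Dict.getD cm.2 uid []).foldl
      (fun s d => if k ≤ PySem.Dict.getD cm.1 d 0 then s + 1 else s) (0 : Int))

-- ===== PRECONDITION & SPEC =====
-- the (reporter, reported) parse of one report log, the deduped parsed report list, and the
-- number of distinct report logs naming d (these only read the input; Pre_ is stated with them)
def pvParse (r : String) : String × String :=
  (((PySem.Str.split? r " ").getD []).getD 0 "", ((PySem.Str.split? r " ").getD []).getD 1 "")
def pvP (report : List String) : List (String × String) := (PySem.List.dedup report).map pvParse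
def pvCnt (report : List String) (d : String) : Nat := ((pvP report).map Prod.snd).count d

-- Pre_ is A's return domain plus one defensible corner: every report log splits on " " into
-- exactly two parts (else A raises ValueError), every reporter of a user reported k or more
-- times is a registered id (else A raises KeyError), and id_list has no duplicate ids (with
-- duplicates, which index of a duplicated id gets incremented is an accident of A's id_map
-- overwriting earlier entries).
def Pre_solution (id_list : List String) (report : List String) (k : Int) : Prop :=
  id_list.Nodup ∧
  (∀ r ∈ report, ((PySem.Str.split? r " ").getD []).length = 2) ∧
  (∀ p ∈ pvP report, k ≤ ((pvCnt report p.2 : Nat) : Int) → p.1 ∈ id_list)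
instance (id_list : List String) (report : List String) (k : Int) : Decidable (Pre_solution id_list report k) := by unfold Pre_solution; infer_instance

def pvWitness_solution : List String × List String × Int :=
  (["muzi", "frodo", "apeach"], ["muzi frodo", "apeach frodo", "muzi frodo", "frodo muzi"], 2)

def Spec_solution (id_list : List String) (report : List String) (k : Int) (out : List Int) : Prop := out = solution_alt id_list report k
instance (id_list : List String) (report : List String) (k : Int) (out : List Int) : Decidable (Spec_solution id_list report k out) := by unfold Spec_solution; infer_instance

-- ===== CLAIM (what is proved, stated in full; the proofs are below) =====
def Claim_equal_solution : Prop := ∀ (id_list : List String) (report : List String) (k : Int), Dom_solution id_list report k → Pre_solution id_list report k → Spec_solution id_list report k (solution id_list report k)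

-- ===== LEMMAS AND PROOFS =====
-- proof-side defs
def pvX (report : List String) (k : Int) (uid : String) (p : String × String) : Bool :=
  p.1 == uid && decide (k ≤ (pvCnt report p.2 : Int))

-- each report string splits into exactly its parse, under Pre
theorem pv_pre_split {id_list report : List String} {k : Int}
    (hpre : Pre_solution id_list report k) {r : String} (hr : r ∈ report) :
    PySem.Str.split? r " " = some [(pvParse r).1, (pvParse r).2] := by
  obtain ⟨-, h2, -⟩ := hpre
  have hlen := h2 r hr
  have hsome : ∃ parts, PySem.Str.split? r " " = some parts := by
    unfold PySem.Str.split?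
    cases ho : PySem.Chars.split? r.toList " ".toList with
    | none => simp [PySem.Chars.split?] at ho
    | some parts => exact ⟨_, rfl⟩
  obtain ⟨parts, hp⟩ := hsome
  rw [hp] at hlen
  simp only [Option.getD_some] at hlen
  match parts, hlen with
  | [a, b], _ => simp [pvParse, hp]

theorem pv_inter_snoc2 (s x y : List Char) (xs : List (List Char)) :
    List.intercalate s (xs ++ [x, y]) = List.intercalate s (xs ++ [x ++ s ++ y]) := by
  induction xs with
  | nil => simp [List.intercalate]
  | cons a t ih =>
    cases t with
    | nil => simp [List.intercalate]
    | cons b u =>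
      have h1 : List.intercalate s ((a :: b :: u) ++ [x, y]) =
          a ++ s ++ List.intercalate s ((b :: u) ++ [x, y]) := by simp [List.intercalate]
      have h2 : List.intercalate s ((a :: b :: u) ++ [x ++ s ++ y]) =
          a ++ s ++ List.intercalate s ((b :: u) ++ [x ++ s ++ y]) := by simp [List.intercalate]
      rw [h1, h2, ih]

theorem pv_go_intercalate (fuel : Nat) (l cur : List Char) (acc : List (List Char))
    (h : l.length < fuel) :
    List.intercalate [' '] (PySem.Chars.splitOn.go [' '] fuel l cur acc) =
      List.intercalate [' '] (acc.reverse ++ [cur.reverse ++ l]) := by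
  induction fuel generalizing l cur acc with
  | zero => omega
  | succ f ih =>
    cases l with
    | nil => simp [PySem.Chars.splitOn.go]
    | cons c rest =>
      by_cases hc : c = ' '
      · subst hc
        have : PySem.Chars.splitOn.go [' '] (f+1) (' ' :: rest) cur acc =
            PySem.Chars.splitOn.go [' '] f rest [] (cur.reverse :: acc) := by
          simp [PySem.Chars.splitOn.go, List.isPrefixOf]
        rw [this, ih _ _ _ (by simpa using Nat.lt_of_succ_lt_succ h)]
        have : (cur.reverse :: acc).reverse = acc.reverse ++ [cur.reverse] := by simp
        rw [this, List.append_assoc]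
        simpa using pv_inter_snoc2 [' '] cur.reverse rest acc.reverse
      · have : PySem.Chars.splitOn.go [' '] (f+1) (c :: rest) cur acc =
            PySem.Chars.splitOn.go [' '] f rest (c :: cur) acc := by
          simp [PySem.Chars.splitOn.go, List.isPrefixOf]
          intro h'
          exact absurd h'.symm hc
        rw [this, ih _ _ _ (by simpa using Nat.lt_of_succ_lt_succ h)]
        simp

theorem pv_split_shape {r a b : String} (h : PySem.Str.split? r " " = some [a, b]) :
    r.toList = a.toList ++ ' ' :: b.toList := by
  have hc : PySem.Chars.split? r.toList [' '] = some [a.toList, b.toList] := by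
    unfold PySem.Str.split? at h
    have hsep : (" " : String).toList = [' '] := rfl
    rw [hsep] at h
    rcases ho : PySem.Chars.split? r.toList [' '] with _ | parts
    · simp [ho] at h
    · rw [ho] at h
      simp only [Option.map_some, Option.some.injEq] at h
      match parts, h with
      | [u, v], h =>
        simp only [List.map_cons, List.map_nil, List.cons.injEq, and_true] at h
        obtain ⟨h1, h2⟩ := h
        rw [← h1, ← h2]
        simp
  have hs : PySem.Chars.splitOn r.toList [' '] = [a.toList, b.toList] := by
    simpa [PySem.Chars.split?] using hc
  have := pv_go_intercalate (r.toList.length + 1) r.toList [] [] (by omega)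
  rw [show PySem.Chars.splitOn.go [' '] (r.toList.length + 1) r.toList [] [] =
      PySem.Chars.splitOn r.toList [' '] from rfl, hs] at this
  simpa [List.intercalate] using this.symm

-- ofList commutes with an injective-on-the-list map
theorem pv_ofList_map {α β : Type} [BEq α] [LawfulBEq α] [BEq β] [LawfulBEq β]
    (f : α → β) : ∀ (l : List α), (∀ x ∈ l, ∀ y ∈ l, f x = f y → x = y) →
    PySem.Set.ofList (l.map f) = (PySem.Set.ofList l).map f := by
  intro l
  induction l with
  | nil => intro _; rfl
  | cons a t ih =>
    intro hinj
    rw [List.map_cons, PySem.Set.ofList_cons, PySem.Set.ofList_cons,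
      ih (fun x hx y hy => hinj x (by simp [hx]) y (by simp [hy]))]
    simp only [PySem.Set.discard, List.filter_map, List.map_cons, List.cons.injEq, true_and]
    congr 1
    apply List.filter_congr
    intro x hx
    have hxl : x ∈ t := by
      exact (PySem.Set.mem_ofList _ _).1 hx
    simp only [Function.comp_apply]
    by_cases hxa : x = a
    · subst hxa; simp
    · have hfne : f x ≠ f a := fun he => hxa (hinj x (by simp [hxl]) a (by simp) he)
      simp [hxa, hfne]

theorem pv_ofList_filter {α : Type} [BEq α] [LawfulBEq α]
    (p : α → Bool) : ∀ (l : List α),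
    PySem.Set.ofList (l.filter p) = (PySem.Set.ofList l).filter p := by
  intro l
  induction l with
  | nil => rfl
  | cons a t ih =>
    by_cases hp : p a
    · rw [List.filter_cons_of_pos hp, PySem.Set.ofList_cons, PySem.Set.ofList_cons,
        List.filter_cons_of_pos hp, ih]
      simp only [PySem.Set.discard, List.filter_filter]
      congr 1
      apply List.filter_congr
      intro x _
      exact Bool.and_comm _ _
    · rw [List.filter_cons_of_neg (by simpa using hp), PySem.Set.ofList_cons,
        List.filter_cons_of_neg (by simpa using hp), ih]
      simp only [PySem.Set.discard, List.filter_filter]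
      apply List.filter_congr
      intro x hx
      have : x ∈ t := (PySem.Set.mem_ofList _ _).1 hx
      by_cases hxa : x = a
      · subst hxa; simp [hp]
      · simp [hxa]
-- injectivity of parsing on well-formed report strings
theorem pv_parse_inj {r1 r2 a b : String}
    (h1 : PySem.Str.split? r1 " " = some [a, b])
    (h2 : PySem.Str.split? r2 " " = some [a, b]) : r1 = r2 := by
  have e1 := pv_split_shape h1
  have e2 := pv_split_shape h2
  have : r1.toList = r2.toList := by rw [e1, e2]
  exact String.toList_inj.mp this
theorem pv_B_char {id_list report : List String} {k : Int} (hpre : Pre_solution id_list report k) :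
    solution_alt id_list report k
      = id_list.map (fun uid => (((pvP report).countP (pvX report k uid) : Nat) : Int)) := by
  simp only [solution_alt]
  rw [PySem.List.foldl_congr_mem _ _
    (fun cm log => (PySem.Dict.insert cm.1 (pvParse log).2 (PySem.Dict.getD cm.1 (pvParse log).2 0 + 1),
       PySem.Dict.modify cm.2 (pvParse log).1 [] (fun l => l ++ [(pvParse log).2]))) _
    (by
      intro cm log hlog
      have hmem : log ∈ report := (PySem.Set.mem_ofList _ _).1 hlog
      rw [pv_pre_split hpre hmem]
      rfl)]
  rw [← List.foldl_map (f := pvParse)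
      (g := fun (cm : PySem.Dict String Int × PySem.Dict String (List String)) (p : String × String) =>
        (cm.1.insert p.2 (cm.1.getD p.2 0 + 1), cm.2.modify p.1 [] fun l => l ++ [p.2]))]
  rw [PySem.List.foldl_prod_mk
    (f := fun d (p : String × String) => PySem.Dict.insert d p.2 (PySem.Dict.getD d p.2 0 + 1))
    (g := fun d (p : String × String) => PySem.Dict.modify d p.1 [] (fun l => l ++ [p.2]))]
  apply List.map_congr_left
  intro uid _
  dsimp only
  rw [← List.foldl_map (f := (Prod.snd : String × String → String))
      (g := fun (d : PySem.Dict String Int) (x : String) => d.insert x (d.getD x 0 + 1))]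
  rw [PySem.Dict.getD_foldl_modify_append ((PySem.List.dedup report).map pvParse) PySem.Dict.empty uid]
  rw [PySem.Dict.getD_empty, List.nil_append]
  rw [PySem.List.foldl_ite_add_one (fun d => k ≤ PySem.Dict.getD (List.foldl (fun d x => PySem.Dict.insert d x (PySem.Dict.getD d x 0 + 1)) PySem.Dict.empty (((PySem.List.dedup report).map pvParse).map Prod.snd)) d 0)]
  rw [zero_add]
  congr 1
  rw [List.countP_map, List.countP_filter]
  unfold pvP pvX pvCnt
  apply List.countP_congr
  intro p _
  simp only [Function.comp_apply, PySem.Dict.getD_foldl_insert_add_one, PySem.Dict.getD_empty, zero_add]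
  unfold pvP
  rw [Bool.and_comm]
-- A's grouping loop: the set stored under c collects the reporters of c in order
theorem pv_getD_group (l : List (String × String)) (d0 : PySem.Dict String (PySem.Set String)) (c : String) :
    (List.foldl (fun d (p : String × String) =>
        PySem.Dict.modify d p.2 PySem.Set.empty (fun s => PySem.Set.add s p.1)) d0 l).getD c PySem.Set.empty
      = PySem.Set.update (d0.getD c PySem.Set.empty) ((l.filter (fun p => p.2 == c)).map Prod.fst) := by
  induction l generalizing d0 with
  | nil => simp [PySem.Set.update_nil]
  | cons p t ih =>
    rw [List.foldl_cons, ih]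
    by_cases hc : p.2 = c
    · rw [List.filter_cons_of_pos (by simp [hc])]
      rw [List.map_cons, PySem.Set.update_cons]
      congr 1
      rw [PySem.Dict.getD_modify]
      simp [hc]
    · rw [List.filter_cons_of_neg (by simp [hc])]
      congr 1
      rw [PySem.Dict.getD_modify]
      simp [Ne.symm hc]

-- A's id_map: looking up the j-th id gives j (no duplicate ids)
theorem pv_idmap_getD (xs : List String) (hnd : xs.Nodup) (m : Nat) (hm : m ≤ xs.length)
    (j : Nat) (hj : j < m) :
    (List.foldl (fun d idx => PySem.Dict.insert d (PySem.List.pyGetD xs idx "") idx)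
        PySem.Dict.empty ((List.range m).map (fun (i : Nat) => (i : Int)))).getD (xs.getD j "") 0 = (j : Int) := by
  induction m with
  | zero => omega
  | succ n ih =>
    rw [List.range_succ, List.map_append, List.foldl_append]
    simp only [List.map_cons, List.map_nil, List.foldl_cons, List.foldl_nil]
    rw [PySem.List.pyGetD_natCast]
    rcases Nat.lt_or_ge j n with h | h
    · have hne : xs.getD j "" ≠ xs.getD n "" := by
        intro he
        have hj' : j < xs.length := by omega
        have hn' : n < xs.length := by omega
        rw [List.getD_eq_getElem xs "" hj', List.getD_eq_getElem xs "" hn'] at he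
        exact absurd (List.Nodup.getElem_inj_iff hnd |>.mp he) (by omega)
      rw [PySem.Dict.getD_insert, if_neg hne, ih (by omega) h]
    · have hjn : j = n := by omega
      subst hjn
      rw [PySem.Dict.getD_insert_self]
theorem pv_incAt_length (ans : List Int) (i : Int) : (pvIncAt ans i).length = ans.length := by
  simp [pvIncAt]

theorem pv_scatter_length (idm : String → Int) (S : List String) (ans : List Int) :
    (S.foldl (fun ans a => pvIncAt ans (idm a)) ans).length = ans.length := by
  induction S generalizing ans with
  | nil => rfl
  | cons a t ih => rw [List.foldl_cons, ih, pv_incAt_length]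

theorem pv_incAt_getD (ans : List Int) (j : Int) (hj : 0 ≤ j ∧ j.toNat < ans.length) (i : Nat) :
    (pvIncAt ans j).getD i 0 = ans.getD i 0 + (if j.toNat = i then 1 else 0) := by
  unfold pvIncAt
  by_cases hij : j.toNat = i
  · subst hij
    rw [List.getD_eq_getElem _ _ (by simpa using hj.2), List.getElem_set_self,
      List.getD_eq_getElem _ _ hj.2]
    simp
  · rw [if_neg hij]
    by_cases hi : i < ans.length
    · rw [List.getD_eq_getElem _ _ (by simpa using hi), List.getD_eq_getElem _ _ hi,
        List.getElem_set_ne (by omega)]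
      simp
    · rw [List.getD_eq_default _ _ (by simpa using Nat.le_of_not_lt hi),
        List.getD_eq_default _ _ (by simpa using Nat.le_of_not_lt hi)]
      simp

theorem pv_scatter_getD (idm : String → Int) (S : List String) (ans : List Int) (i : Nat)
    (hS : ∀ a ∈ S, 0 ≤ idm a ∧ (idm a).toNat < ans.length) :
    (S.foldl (fun ans a => pvIncAt ans (idm a)) ans).getD i 0
      = ans.getD i 0 + (S.countP (fun a => (idm a).toNat == i) : Int) := by
  induction S generalizing ans with
  | nil => simp
  | cons a t ih =>
    rw [List.foldl_cons, ih _ (fun x hx => by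
      rw [pv_incAt_length]; exact hS x (List.mem_cons_of_mem _ hx))]
    rw [pv_incAt_getD ans (idm a) (hS a (List.mem_cons_self)) i]
    rw [List.countP_cons]
    by_cases hia : (idm a).toNat = i
    · simp [hia]; ring
    · simp [hia]

theorem pv_sum_map_cast (K : List String) (f : String → Nat) :
    (K.map (fun c => ((f c : Nat) : Int))).sum = ((K.map f).sum : Int) := by
  induction K with
  | nil => simp
  | cons c t ih => simp [ih]

theorem pv_sum_map_add_nat (K : List String) (f g : String → Nat) :
    (K.map (fun c => f c + g c)).sum = (K.map f).sum + (K.map g).sum := by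
  induction K with
  | nil => simp
  | cons c t ih => simp [ih]; ring
theorem pv_outer_length (k : Int) (idm : String → Int) (K : List (String × PySem.Set String))
    (ans : List Int) :
    (K.foldl (fun ans p => if k ≤ PySem.Set.len p.2 then
        p.2.foldl (fun ans a => pvIncAt ans (idm a)) ans else ans) ans).length = ans.length := by
  induction K generalizing ans with
  | nil => rfl
  | cons p t ih =>
    rw [List.foldl_cons, ih]
    by_cases h : k ≤ PySem.Set.len p.2
    · rw [if_pos h, pv_scatter_length]
    · rw [if_neg h]

theorem pv_outer_getD (k : Int) (idm : String → Int) (K : List (String × PySem.Set String))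
    (ans : List Int) (i : Nat)
    (hK : ∀ p ∈ K, k ≤ PySem.Set.len p.2 → ∀ a ∈ p.2, 0 ≤ idm a ∧ (idm a).toNat < ans.length) :
    (K.foldl (fun ans p => if k ≤ PySem.Set.len p.2 then
        p.2.foldl (fun ans a => pvIncAt ans (idm a)) ans else ans) ans).getD i 0
      = ans.getD i 0 + (K.map (fun p => if k ≤ PySem.Set.len p.2 then
          ((p.2.countP (fun a => (idm a).toNat == i) : Nat) : Int) else 0)).sum := by
  induction K generalizing ans with
  | nil => simp
  | cons p t ih =>
    rw [List.foldl_cons]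
    by_cases h : k ≤ PySem.Set.len p.2
    · rw [if_pos h, ih _ (fun q hq hq2 a ha => by
        rw [pv_scatter_length]; exact hK q (List.mem_cons_of_mem _ hq) hq2 a ha)]
      rw [pv_scatter_getD idm p.2 ans i (hK p List.mem_cons_self h)]
      rw [List.map_cons, List.sum_cons, if_pos h]
      ring
    · rw [if_neg h, ih _ (fun q hq hq2 a ha => hK q (List.mem_cons_of_mem _ hq) hq2 a ha)]
      rw [List.map_cons, List.sum_cons, if_neg h, zero_add]

theorem pv_sum_indicator (K : List String) (x : String) :
    (K.map (fun c => if x == c then 1 else 0)).sum = K.countP (fun c => x == c) := by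
  induction K with
  | nil => rfl
  | cons c t ih =>
    rw [List.map_cons, List.sum_cons, List.countP_cons, ih]
    by_cases h : x = c
    · simp [h]; ring
    · simp [h]
-- grouping a count over distinct group keys collapses to one count
theorem pv_sum_collapse (K : List String) (P : List (String × String)) (X : String × String → Bool)
    (hnd : K.Nodup) (hcov : ∀ p ∈ P, p.2 ∈ K) :
    (K.map (fun c => P.countP (fun p => p.2 == c && X p))).sum = P.countP X := by
  induction P with
  | nil => simp
  | cons p t ih =>
    have hrw : (K.map (fun c => (p :: t).countP (fun q => q.2 == c && X q)))
        = K.map (fun c => t.countP (fun q => q.2 == c && X q) + (if p.2 == c && X p then 1 else 0)) := by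
      apply List.map_congr_left
      intro c _
      rw [List.countP_cons]
    rw [hrw, pv_sum_map_add_nat, ih (fun q hq => hcov q (List.mem_cons_of_mem _ hq)),
      List.countP_cons]
    congr 1
    by_cases hX : X p = true
    · have : (K.map (fun c => if p.2 == c && X p then 1 else 0))
          = K.map (fun c => if p.2 == c then 1 else 0) := by
        apply List.map_congr_left
        intro c _
        simp [hX]
      rw [this, pv_sum_indicator]
      have hc : K.countP (fun c => p.2 == c) = K.count p.2 := by
        unfold List.count
        apply List.countP_congr
        intro c _
        by_cases h : c = p.2
        · simp [h]
        · simp [h]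
          exact fun he => h (Eq.symm he)
      rw [hc, List.count_eq_one_of_mem hnd (hcov p List.mem_cons_self)]
      simp [hX]
    · have : (K.map (fun c => if p.2 == c && X p then 1 else 0))
          = K.map (fun c => 0) := by
        apply List.map_congr_left
        intro c _
        simp [hX]
      rw [this]
      simp [hX]
def pvS (report : List String) (c : String) : List String :=
  ((pvP report).filter (fun p => p.2 == c)).map Prod.fst

-- the reporter set A stores under c is exactly the deduped reporters of c
theorem pv_Sc {id_list report : List String} {k : Int} (hpre : Pre_solution id_list report k)
    (c : String) :
    PySem.Set.ofList (((report.map pvParse).filter (fun p => p.2 == c)).map Prod.fst)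
      = pvS report c := by
  rw [List.filter_map, List.map_map]
  unfold pvS pvP
  rw [List.filter_map, List.map_map]
  have hded : PySem.List.dedup report = PySem.Set.ofList report := rfl
  rw [hded, ← pv_ofList_filter]
  apply pv_ofList_map
  intro x hx y hy hxy
  have hx' : x ∈ report := (List.mem_filter.mp hx).1
  have hy' : y ∈ report := (List.mem_filter.mp hy).1
  have hcx : (pvParse x).2 = c := by
    have := (List.mem_filter.mp hx).2
    simpa using this
  have hcy : (pvParse y).2 = c := by
    have := (List.mem_filter.mp hy).2
    simpa using this
  have hsx := pv_pre_split hpre hx'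
  have hsy := pv_pre_split hpre hy'
  simp only [Function.comp_apply] at hxy
  rw [hcx] at hsx
  rw [hcy] at hsy
  rw [hxy] at hsx
  exact pv_parse_inj hsx hsy

theorem pv_mem_pvP {report : List String}
    {p : String × String} (hp : p ∈ pvP report) : p ∈ report.map pvParse := by
  obtain ⟨r, hr, hrp⟩ := List.mem_map.mp hp
  exact List.mem_map.mpr ⟨r, (PySem.Set.mem_ofList _ _).1 hr, hrp⟩
theorem pv_idm_iff (xs : List String) (hnd : xs.Nodup) (i : Nat) (hi : i < xs.length)
    (a : String) (ha : a ∈ xs) :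
    ((((List.foldl (fun d idx => PySem.Dict.insert d (PySem.List.pyGetD xs idx "") idx)
        PySem.Dict.empty ((List.range xs.length).map (fun (j : Nat) => (j : Int)))).getD a 0).toNat == i)
      = (a == xs.getD i "")) := by
  obtain ⟨j, hj, hja⟩ := List.mem_iff_getElem.mp ha
  have hgd : a = xs.getD j "" := by rw [List.getD_eq_getElem _ _ hj, hja]
  rw [hgd, pv_idmap_getD xs hnd xs.length le_rfl j hj]
  simp only [Int.toNat_natCast]
  by_cases hij : j = i
  · subst hij
    simp
  · have hne : xs.getD j "" ≠ xs.getD i "" := by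
      rw [List.getD_eq_getElem _ _ hj, List.getD_eq_getElem _ _ hi]
      intro he
      exact hij (List.Nodup.getElem_inj_iff hnd |>.mp he)
    have h2 : (j == i) = false := by simp [hij]
    have h3 : (xs.getD j "" == xs.getD i "") = false := by
      simp only [beq_eq_false_iff_ne, ne_eq]
      exact hne
    rw [h2, h3]

theorem pv_main (id_list report : List String) (k : Int) (hpre : Pre_solution id_list report k) :
    solution id_list report k = solution_alt id_list report k := by
  have hnd : id_list.Nodup := hpre.1
  rw [pv_B_char hpre]
  simp only [solution]
  rw [PySem.List.pyRange_zero_natCast]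
  rw [PySem.List.foldl_congr_mem _ _
    (fun d log => PySem.Dict.modify d (pvParse log).2 PySem.Set.empty
      (fun s => PySem.Set.add s (pvParse log).1)) _
    (by intro d log hlog; rw [pv_pre_split hpre hlog])]
  rw [← List.foldl_map (f := pvParse)
    (g := fun d (p : String × String) => PySem.Dict.modify d p.2 PySem.Set.empty
      (fun s => PySem.Set.add s p.1))]
  have hnodk : (List.foldl (fun d (p : String × String) => PySem.Dict.modify d p.2 PySem.Set.empty
      (fun s => PySem.Set.add s p.1)) PySem.Dict.empty (report.map pvParse)).keys.Nodup := by
    exact PySem.Dict.nodup_keys_foldl_modify_key (report.map pvParse)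
      (fun (p : String × String) => p.2) PySem.Set.empty
      (fun d (p : String × String) => fun s => PySem.Set.add s p.1) PySem.Dict.empty
      (by rw [PySem.Dict.keys_empty]; exact List.nodup_nil)
  rw [PySem.Dict.items_eq_map_keys _ hnodk PySem.Set.empty]
  have hkeys : (List.foldl (fun d (p : String × String) => PySem.Dict.modify d p.2 PySem.Set.empty
      (fun s => PySem.Set.add s p.1)) PySem.Dict.empty (report.map pvParse)).keys
      = PySem.Set.ofList ((report.map pvParse).map (fun p => p.2)) := by
    have h1 := PySem.Dict.keys_foldl_modify_key (report.map pvParse)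
      (fun (p : String × String) => p.2) PySem.Set.empty
      (fun d (p : String × String) => fun s => PySem.Set.add s p.1) PySem.Dict.empty
    rw [h1, PySem.Dict.keys_empty]
    exact PySem.Set.update_empty _
  rw [hkeys]
  have hmapS : (PySem.Set.ofList ((report.map pvParse).map (fun p => p.2))).map
      (fun c => (c, (List.foldl (fun d (p : String × String) => PySem.Dict.modify d p.2 PySem.Set.empty
        (fun s => PySem.Set.add s p.1)) PySem.Dict.empty (report.map pvParse)).getD c PySem.Set.empty))
      = (PySem.Set.ofList ((report.map pvParse).map (fun p => p.2))).map
        (fun c => (c, (pvS report c : PySem.Set String))) := by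
    apply List.map_congr_left
    intro c _
    rw [pv_getD_group, PySem.Dict.getD_empty, PySem.Set.update_empty]
    rw [pv_Sc hpre c]
  rw [hmapS]
  apply List.ext_getElem
  · rw [pv_outer_length]
    simp
  · intro i h1 h2
    have hi : i < id_list.length := by simpa using h2
    have hidm : ∀ a ∈ id_list, 0 ≤ (List.foldl (fun d idx => PySem.Dict.insert d (PySem.List.pyGetD id_list idx "") idx)
        PySem.Dict.empty ((List.range id_list.length).map (fun (j : Nat) => (j : Int)))).getD a 0 ∧
        ((List.foldl (fun d idx => PySem.Dict.insert d (PySem.List.pyGetD id_list idx "") idx)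
        PySem.Dict.empty ((List.range id_list.length).map (fun (j : Nat) => (j : Int)))).getD a 0).toNat < id_list.length := by
      intro a ha
      obtain ⟨j, hj, hja⟩ := List.mem_iff_getElem.mp ha
      have hgd : a = id_list.getD j "" := by rw [List.getD_eq_getElem _ _ hj, hja]
      rw [hgd, pv_idmap_getD id_list hnd id_list.length le_rfl j hj]
      constructor
      · exact Int.natCast_nonneg j
      · simpa using hj
    rw [List.getElem_map]
    rw [← List.getD_eq_getElem _ 0 h1]
    rw [pv_outer_getD k (fun a => (List.foldl (fun d idx => PySem.Dict.insert d (PySem.List.pyGetD id_list idx "") idx)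
        PySem.Dict.empty ((List.range id_list.length).map (fun (j : Nat) => (j : Int)))).getD a 0) _ _ i ?hK]
    case hK =>
      intro p hp hbig a ha
      obtain ⟨c, hc, rfl⟩ := List.mem_map.mp hp
      obtain ⟨q, hq, hqa⟩ := List.mem_map.mp ha
      have hq' : q ∈ pvP report := (List.mem_filter.mp hq).1
      have hq2 : q.2 = c := by
        have := (List.mem_filter.mp hq).2
        simpa using this
      have hlen : PySem.Set.len (pvS report c) = ((pvCnt report c : Nat) : Int) := by
        unfold PySem.Set.len pvS pvCnt
        rw [List.length_map, ← List.countP_eq_length_filter, List.count_eq_countP, List.countP_map]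
        rfl
      have haid : a ∈ id_list := by
        rw [← hqa]
        refine hpre.2.2 q hq' ?_
        rw [hq2]
        rw [hlen] at hbig
        simpa using hbig
      have := hidm a haid
      simpa using this
    have h0 : (((List.range id_list.length).map (fun (j : Nat) => (j : Int))).map
        (fun _ => (0 : Int))).getD i 0 = 0 := by
      rw [List.getD_eq_getElem _ _ (by simpa using hi)]
      simp
    rw [h0, zero_add, List.map_map]
    -- per-key term rewriting, then collapse the grouped sum
    have hterm : ∀ c ∈ PySem.Set.ofList ((report.map pvParse).map (fun p => p.2)),
        ((fun p : String × PySem.Set String => if k ≤ PySem.Set.len p.2 then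
            ((p.2.countP (fun a => ((List.foldl (fun d idx => PySem.Dict.insert d (PySem.List.pyGetD id_list idx "") idx)
              PySem.Dict.empty ((List.range id_list.length).map (fun (j : Nat) => (j : Int)))).getD a 0).toNat == i) : Nat) : Int) else 0)
          ∘ (fun c => (c, (pvS report c : PySem.Set String)))) c
        = (((pvP report).countP (fun p => p.2 == c && pvX report k (id_list.getD i "") p) : Nat) : Int) := by
      intro c _
      simp only [Function.comp_apply]
      have hlen : PySem.Set.len (pvS report c) = ((pvCnt report c : Nat) : Int) := by
        unfold PySem.Set.len pvS pvCnt
        rw [List.length_map, ← List.countP_eq_length_filter, List.count_eq_countP, List.countP_map]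
        rfl
      rw [hlen]
      by_cases hk : k ≤ ((pvCnt report c : Nat) : Int)
      · -- the inner scatter count, rewritten through the filter/map chain
        have hcount : (pvS report c).countP (fun a => ((List.foldl (fun d idx => PySem.Dict.insert d (PySem.List.pyGetD id_list idx "") idx)
              PySem.Dict.empty ((List.range id_list.length).map (fun (j : Nat) => (j : Int)))).getD a 0).toNat == i)
            = (pvP report).countP (fun p => p.1 == id_list.getD i "" && p.2 == c) := by
          unfold pvS
          rw [List.countP_map, List.countP_filter]
          apply List.countP_congr
          intro p hp
          simp only [Function.comp_apply]
          by_cases hc2 : p.2 = c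
          · have h1 : p.1 ∈ id_list := hpre.2.2 p hp (by rw [hc2]; exact hk)
            rw [pv_idm_iff id_list hnd i hi p.1 h1]
          · have hf : (p.2 == c) = false := by simpa using hc2
            rw [hf, Bool.and_false, Bool.and_false]
        rw [hcount, if_pos hk]
        congr 1
        apply List.countP_congr
        intro p _
        by_cases hc2 : p.2 = c
        · unfold pvX
          simp [hc2]
          exact fun _ => hk
        · unfold pvX
          simp [hc2]
      · rw [if_neg hk]
        have : (pvP report).countP (fun p => p.2 == c && pvX report k (id_list.getD i "") p) = 0 := by
          rw [List.countP_eq_zero]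
          intro p _
          unfold pvX
          intro hcon
          simp only [Bool.and_eq_true, beq_iff_eq, decide_eq_true_eq] at hcon
          exact hk (hcon.1 ▸ hcon.2.2)
        rw [this]
        rfl
    rw [List.map_congr_left hterm, pv_sum_map_cast _ (fun c => (pvP report).countP
      (fun p => p.2 == c && pvX report k (id_list.getD i "") p))]
    rw [pv_sum_collapse _ _ _ (PySem.Set.nodup_ofList _) ?hcov]
    case hcov =>
      intro p hp
      exact (PySem.Set.mem_ofList _ _).2 (List.mem_map_of_mem (pv_mem_pvP hp))
    rw [List.getD_eq_getElem _ _ hi]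

-- ===== VERDICT (by name: the statement is the Claim_ definition above) =====
theorem solution_spec : Claim_equal_solution := by
  intro id_list report k _ hpre
  exact pv_main id_list report k hpre
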